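-- pv_equiv track=rewrite | github.com/BDB-Labs/TruePresenceESE | ese/pipeline.py | _normalize_role_order
-- ===== SOURCE A (Python) =====
-- from typing import Any, Callable, Dict, Mapping, Protocol
--
-- PIPELINE_ORDER = [
--     "architect",
--     "implementer",
--     "adversarial_reviewer",
--     "security_auditor",
--     "test_generator",
--     "performance_analyst",
--     "documentation_writer",
--     "devops_sre",
--     "database_engineer",
--     "release_manager",
-- ]
--
-- def _normalize_role_order(cfg: Dict[str, Any]) -> list[str]:
--     roles_cfg = cfg.get("roles") or {}
--     configured_roles = list(roles_cfg.keys()) if isinstance(roles_cfg, dict) else []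
--     if not configured_roles:
--         return []
--
--     ordered: list[str] = [role for role in PIPELINE_ORDER if role in configured_roles]
--     ordered.extend(role for role in configured_roles if role not in ordered)
--     return ordered
-- ===== SOURCE B (Python) =====
-- PIPELINE_ORDER = [
--     "architect",
--     "implementer",
--     "adversarial_reviewer",
--     "security_auditor",
--     "test_generator",
--     "performance_analyst",
--     "documentation_writer",
--     "devops_sre",
--     "database_engineer",
--     "release_manager",
-- ]
--
--
-- def _normalize_role_order(cfg):
--     roles_cfg = cfg.get("roles") or {}
--     configured_roles = list(roles_cfg.keys()) if isinstance(roles_cfg, dict) else []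
--     if not configured_roles:
--         return []
--     rank = {name: i for i, name in enumerate(PIPELINE_ORDER)}
--     unknown = len(PIPELINE_ORDER)
--     return sorted(configured_roles, key=lambda r: rank.get(r, unknown))
-- ===== Notes on version B (the rewrite author's own statement) =====
-- stated objective: simpler
-- what changed: Replaces A's two filtering scans (pipeline scan with list membership, then an extend pass testing membership in the growing ordered list) by one stable sort of the configured roles keyed by a precomputed pipeline-index table, with unknown roles keyed past all pipeline indices so they keep their configured order.
import Mathlib
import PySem

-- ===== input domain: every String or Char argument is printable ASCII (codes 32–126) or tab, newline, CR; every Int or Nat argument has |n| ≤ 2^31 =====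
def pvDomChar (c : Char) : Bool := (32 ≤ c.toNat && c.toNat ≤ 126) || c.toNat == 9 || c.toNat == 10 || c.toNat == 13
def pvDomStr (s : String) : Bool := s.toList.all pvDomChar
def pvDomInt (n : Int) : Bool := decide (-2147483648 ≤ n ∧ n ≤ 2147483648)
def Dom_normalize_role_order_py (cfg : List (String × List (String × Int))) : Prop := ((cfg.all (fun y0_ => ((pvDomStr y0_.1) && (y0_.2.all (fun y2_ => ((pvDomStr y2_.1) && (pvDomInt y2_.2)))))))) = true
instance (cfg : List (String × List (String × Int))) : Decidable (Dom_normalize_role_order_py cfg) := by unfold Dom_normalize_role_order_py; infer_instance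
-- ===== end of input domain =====

-- B replaces A's two filtering scans by one stable sort keyed by a precomputed pipeline-index table (objective: simpler).

-- ===== PORT A =====
def pvPipeline : List String :=
  ["architect", "implementer", "adversarial_reviewer", "security_auditor", "test_generator",
   "performance_analyst", "documentation_writer", "devops_sre", "database_engineer", "release_manager"]

-- `cfg.get("roles") or {}`: a missing key and an empty dict both yield {} (and on this input type
-- the value is always a dict, so `isinstance(roles_cfg, dict)` is always true).
def normalize_role_order_py (cfg : List (String × List (String × Int))) : List String :=
  let roles_cfg : List (String × Int) := (PySem.Dict.ofList cfg).getD "roles" []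
  let configured_roles : List String := (PySem.Dict.ofList roles_cfg).keys
  if configured_roles.isEmpty then []
  else
    let ordered : List String := pvPipeline.filter (fun role => configured_roles.contains role)
    configured_roles.foldl (fun acc role => if acc.contains role then acc else acc ++ [role]) ordered

-- ===== PORT B =====
-- rank = {name: i for i, name in enumerate(PIPELINE_ORDER)}
def pvRank : PySem.Dict String Int :=
  PySem.Dict.ofList ((PySem.List.enumerate pvPipeline).map (fun p => (p.2, p.1)))

def normalize_role_order_py_alt (cfg : List (String × List (String × Int))) : List String :=
  let roles_cfg : List (String × Int) := (PySem.Dict.ofList cfg).getD "roles" []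
  let configured_roles : List String := (PySem.Dict.ofList roles_cfg).keys
  if configured_roles.isEmpty then []
  else
    PySem.List.sorted configured_roles (fun r => pvRank.getD r (PySem.List.len pvPipeline)) false

-- ===== PRECONDITION & SPEC =====
def Spec_normalize_role_order_py (cfg : List (String × List (String × Int))) (out : List String) : Prop := out = normalize_role_order_py_alt cfg
instance (cfg : List (String × List (String × Int))) (out : List String) : Decidable (Spec_normalize_role_order_py cfg out) := by unfold Spec_normalize_role_order_py; infer_instance

-- ===== CLAIM (what is proved, stated in full; the proofs are below) =====
def Claim_equal_normalize_role_order_py : Prop := ∀ (cfg : List (String × List (String × Int))), Dom_normalize_role_order_py cfg → Spec_normalize_role_order_py cfg (normalize_role_order_py cfg)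

-- ===== LEMMAS AND PROOFS =====

-- Inserting in front when the new element sorts strictly before everything in the list.
theorem pv_insertBy_cons_of_before {α : Type} (bef : α → α → Bool) (x : α) (L : List α)
    (h : ∀ y ∈ L, bef x y = true) : PySem.List.insertBy bef x L = x :: L := by
  cases L with
  | nil => rfl
  | cons y ys => simp [PySem.List.insertBy, h y (by simp)]

theorem pv_insertBy_cons_of_not_before {α : Type} (bef : α → α → Bool) (x y : α) (ys : List α)
    (h : bef x y = false) : PySem.List.insertBy bef x (y :: ys) = y :: PySem.List.insertBy bef x ys := by
  simp [PySem.List.insertBy, h]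

-- Stable insertion of a pipeline role into the already-ordered pipeline part: it lands exactly at
-- its pipeline position (keys strictly increase along P; everything in T sorts strictly after c).
theorem pv_insert_pipeline (key : String → Int) (c : String) :
    ∀ (P : List String) (cs T : List String),
      P.Pairwise (fun a b => key a < key b) → c ∈ P → cs.contains c = false →
      (∀ y ∈ T, key c < key y) →
      PySem.List.insertBy (fun a b => decide (key a < key b)) c
        (P.filter (fun p => cs.contains p) ++ T)
      = P.filter (fun p => cs.contains p || p == c) ++ T := by
  intro P
  induction P with
  | nil => intro cs T _ hc; simp at hc
  | cons p P ih =>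
    intro cs T hpw hc hcs hT
    rcases List.pairwise_cons.mp hpw with ⟨hp, hpw'⟩
    by_cases hpc : p = c
    · subst hpc
      have hpm : p ∉ cs := by simpa using hcs
      have hfilt : P.filter (fun q => cs.contains q || q == p) = P.filter (fun q => cs.contains q) := by
        apply List.filter_congr
        intro q hq
        have hne : q ≠ p := by
          intro h; exact absurd (h ▸ hp q hq) (lt_irrefl _)
        simp [hne]
      rw [List.filter_cons_of_neg (by simp [hpm])]
      rw [List.filter_cons_of_pos (by simp), hfilt]
      rw [pv_insertBy_cons_of_before]
      · simp
      · intro y hy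
        rcases List.mem_append.mp hy with hy | hy
        · simpa using hp y (List.mem_filter.mp hy).1
        · simpa using hT y hy
    · have hcP : c ∈ P := by
        rcases List.mem_cons.mp hc with h | h
        · exact absurd h.symm hpc
        · exact h
      have hkey : key p < key c := hp c hcP
      by_cases hpcs : cs.contains p
      · have hpm : p ∈ cs := by simpa using hpcs
        rw [List.filter_cons_of_pos hpcs, List.filter_cons_of_pos (by simp [hpm]), List.cons_append,
            List.cons_append, pv_insertBy_cons_of_not_before _ _ _ _ (by simp [not_lt.mpr (le_of_lt hkey)]),
            ih cs T hpw' hcP hcs hT]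
      · have hpm : p ∉ cs := by simpa using hpcs
        rw [List.filter_cons_of_neg (by simpa using hpcs), List.filter_cons_of_neg (by simp [hpm, hpc])]
        exact ih cs T hpw' hcP hcs hT

-- A's extend pass over a duplicate-free list appends exactly the elements not already present.
theorem pv_extend_eq_filter : ∀ (cs acc : List String), cs.Nodup →
    cs.foldl (fun acc role => if acc.contains role then acc else acc ++ [role]) acc
    = acc ++ cs.filter (fun r => !acc.contains r) := by
  intro cs
  induction cs with
  | nil => intro acc _; simp
  | cons c cs ih =>
    intro acc hnd
    rcases List.nodup_cons.mp hnd with ⟨hcn, hnd'⟩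
    by_cases hc : acc.contains c
    · rw [List.foldl_cons, if_pos hc, ih acc hnd', List.filter_cons_of_neg (by simpa using hc)]
    · have hcm : c ∉ acc := by simpa using hc
      rw [List.foldl_cons, if_neg hc, ih (acc ++ [c]) hnd',
          List.filter_cons_of_pos (by simp [hcm])]
      have hcongr : cs.filter (fun r => !(acc ++ [c]).contains r) = cs.filter (fun r => !acc.contains r) := by
        apply List.filter_congr
        intro r hr
        have : r ≠ c := fun h => hcn (h ▸ hr)
        simp [this]
      rw [hcongr]
      simp

-- The stable sort keyed below: pipeline roles first in pipeline order, then the rest in input order.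
theorem pv_sorted_eq (key : String → Int) (P : List String) (K : Int)
    (hpw : P.Pairwise (fun a b => key a < key b))
    (hlo : ∀ p ∈ P, key p < K)
    (hhi : ∀ r, P.contains r = false → key r = K) :
    ∀ cs : List String, cs.Nodup →
      PySem.List.sorted cs key false
      = P.filter (fun p => cs.contains p) ++ cs.filter (fun r => !P.contains r) := by
  intro cs
  induction cs using List.reverseRecOn with
  | nil => intro _; simp [PySem.List.sorted]
  | append_singleton cs c ih =>
    intro hnd
    have hnd' : cs.Nodup := (List.nodup_append.mp hnd).1
    have hcn : c ∉ cs := by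
      intro hm
      exact (List.nodup_append.mp hnd).2.2 c hm c (by simp) rfl
    have hstep : PySem.List.sorted (cs ++ [c]) key false
        = PySem.List.insertBy (fun a b => decide (key a < key b)) c (PySem.List.sorted cs key false) := by
      rw [PySem.List.sorted_eq_foldl_insertBy, PySem.List.sorted_eq_foldl_insertBy, List.foldl_append]
      rfl
    rw [hstep, ih hnd']
    by_cases hcP : c ∈ P
    · have hkc : key c < K := hlo c hcP
      rw [pv_insert_pipeline key c P cs (cs.filter (fun r => !P.contains r)) hpw hcP (by simpa using hcn)]
      · have h1 : P.filter (fun p => cs.contains p || p == c) = P.filter (fun p => (cs ++ [c]).contains p) := by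
          apply List.filter_congr
          intro p _
          by_cases h : p = c <;> simp [h]
        have h2 : (cs ++ [c]).filter (fun r => !P.contains r) = cs.filter (fun r => !P.contains r) := by
          rw [List.filter_append]; simp [hcP]
        rw [h1, h2]
      · intro y hy
        have hyP : P.contains y = false := by simpa using (List.mem_filter.mp hy).2
        rw [hhi y hyP]; exact hkc
    · have hkc : key c = K := hhi c (by simpa using hcP)
      rw [PySem.List.insertBy_of_forall_not_before]
      · have h1 : P.filter (fun p => (cs ++ [c]).contains p) = P.filter (fun p => cs.contains p) := by
          apply List.filter_congr
          intro p hp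
          have : p ≠ c := fun h => hcP (h ▸ hp)
          simp [this]
        have h2 : (cs ++ [c]).filter (fun r => !P.contains r) = cs.filter (fun r => !P.contains r) ++ [c] := by
          rw [List.filter_append]; simp [hcP]
        rw [h1, h2, List.append_assoc]
      · intro y hy
        rcases List.mem_append.mp hy with hy | hy
        · have := hlo y (List.mem_filter.mp hy).1
          simp [hkc, not_lt.mpr (le_of_lt this)]
        · have hyP : P.contains y = false := by simpa using (List.mem_filter.mp hy).2
          simp [hkc, hhi y hyP]

-- The concrete key of B: roles outside the pipeline get the default 10 = len(PIPELINE_ORDER).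
theorem pv_key_not_mem (r : String) (h : pvPipeline.contains r = false) :
    pvRank.getD r (PySem.List.len pvPipeline) = 10 := by
  simp only [pvPipeline, List.contains_cons, Bool.or_eq_false_iff, beq_eq_false_iff_ne, ne_eq] at h
  obtain ⟨h1, h2, h3, h4, h5, h6, h7, h8, h9, h10, -⟩ := h
  rw [show pvRank = PySem.Dict.mk
    [("architect", (0:Int)), ("implementer", 1), ("adversarial_reviewer", 2), ("security_auditor", 3),
     ("test_generator", 4), ("performance_analyst", 5), ("documentation_writer", 6), ("devops_sre", 7),
     ("database_engineer", 8), ("release_manager", 9)] from by rfl]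
  simp [PySem.Dict.getD, PySem.Dict.get?, pvPipeline,
    Ne.symm h1, Ne.symm h2, Ne.symm h3, Ne.symm h4, Ne.symm h5, Ne.symm h6, Ne.symm h7,
    Ne.symm h8, Ne.symm h9, Ne.symm h10, PySem.List.len]

-- ===== VERDICT (by name: the statement is the Claim_ definition above) =====
theorem normalize_role_order_py_spec : Claim_equal_normalize_role_order_py := by
  intro cfg _
  show normalize_role_order_py cfg = normalize_role_order_py_alt cfg
  unfold normalize_role_order_py normalize_role_order_py_alt
  dsimp only
  have hnd : ((PySem.Dict.ofList ((PySem.Dict.ofList cfg).getD "roles" [])).keys).Nodup :=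
    PySem.Dict.nodup_keys_ofList _
  generalize hcs : ((PySem.Dict.ofList ((PySem.Dict.ofList cfg).getD "roles" [])).keys) = cs at hnd ⊢
  by_cases he : cs.isEmpty
  · rw [if_pos he, if_pos he]
  · rw [if_neg he, if_neg he]
    rw [pv_extend_eq_filter cs (pvPipeline.filter (fun role => cs.contains role)) hnd]
    rw [pv_sorted_eq (fun r => pvRank.getD r (PySem.List.len pvPipeline)) pvPipeline 10
        (by decide) (by decide) pv_key_not_mem cs hnd]
    congr 1
    apply List.filter_congr
    intro r hr
    simp
    exact fun h => absurd hr h
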